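-- pv_equiv track=rewrite | github.com/ManuelGander/MasterThesis_Elastic_Net_and_more | All_notebooks_and_scripts/0_Data_preparation/1_Omics_data/Kinase_scores_via_wp3_sample_pipeline-master/bin/clinical_tools.py | add_url_columns
-- ===== SOURCE A (Python) =====
-- from itertools import compress
-- from typing import List, Dict, Tuple, Union
--
-- def add_url_columns(row) -> Tuple[str, List]:
--     start_positions, proteins = row
--     # create boolean list for (p-site, protein) pairs found in PSP or not
--     # check for any modified peptide with start position different from -1
--     found_psites = [int(value) > 0 for value in start_positions.split(';') if value != '']
--     # row[0] is integer index of row and row[1] is column value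
--     proteins = list(compress(proteins.split(';'),
--                              found_psites))
--
--     URLs = list()
--     main_url = ""
--     main_found = False
--
--     # There can be found more than one main protein URL but then the first is used
--     # and the rest goes with the isoform URLs
--     url_start = "https://www.phosphosite.org/uniprotAccAction?id="
--     for index, protein in enumerate(proteins):
--         # don't allow isoforms (recognizable by "-" in their protein IDs) as main protein
--         if '-' not in protein and not main_found:
--             main_url = "=HYPERLINK(\"" + str(url_start) + str(protein) + "\")"
--             main_found = True
--         else:
--             URLs.append(str(url_start) + str(protein))
--
--     return main_url, URLs
-- ===== SOURCE B (Python) =====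
-- from itertools import compress
--
--
-- def add_url_columns(row):
--     # Locate-first decomposition: find the index of the first non-isoform once,
--     # then build main_url and the URL list from that index (no flag threading).
--     start_positions, proteins = row
--     found_psites = [int(value) > 0 for value in start_positions.split(';') if value != '']
--     proteins = list(compress(proteins.split(';'), found_psites))
--     url_start = "https://www.phosphosite.org/uniprotAccAction?id="
--     i = next((j for j, p in enumerate(proteins) if '-' not in p), None)
--     if i is None:
--         return "", [url_start + p for p in proteins]
--     rest = proteins[:i] + proteins[i + 1:]
--     return "=HYPERLINK(\"" + url_start + proteins[i] + "\")", [url_start + p for p in rest]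
-- ===== Notes on version B (the rewrite author's own statement) =====
-- stated objective: alternative
-- what changed: Replaces A's single flag-threaded loop (main_found boolean deciding per element whether to set main_url or append) by a locate-first decomposition: find the index of the first non-isoform once with next/enumerate, then build main_url and the URL list by slicing that index out and mapping.
import Mathlib
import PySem

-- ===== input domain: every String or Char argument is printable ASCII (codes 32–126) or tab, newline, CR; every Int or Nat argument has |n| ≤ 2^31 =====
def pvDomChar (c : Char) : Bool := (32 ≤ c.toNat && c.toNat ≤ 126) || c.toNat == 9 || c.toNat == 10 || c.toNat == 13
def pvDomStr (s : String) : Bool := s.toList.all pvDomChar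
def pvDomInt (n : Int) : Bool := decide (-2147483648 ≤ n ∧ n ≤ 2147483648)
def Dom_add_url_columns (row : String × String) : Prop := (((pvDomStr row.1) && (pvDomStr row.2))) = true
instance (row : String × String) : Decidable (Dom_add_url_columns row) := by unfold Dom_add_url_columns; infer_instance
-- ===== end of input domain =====

-- B replaces A's flag-threaded loop by locating the first non-isoform index once and
-- rebuilding both outputs from that index (alternative decomposition; return values only).

def pvUrlStart : String := "https://www.phosphosite.org/uniprotAccAction?id="

-- s.split(';'): split? is none only for an empty separator, so getD [] is exact here
def pvSplitSemi (s : String) : List String := (PySem.Str.split? s ";").getD []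

-- [int(value) > 0 for value in start_positions.split(';') if value != ''];
-- (PySem.Int.ofStr? v).getD 0 is only reached outside Pre_ (where int() raises ValueError)
def pvFoundPsites (start_positions : String) : List Bool :=
  ((pvSplitSemi start_positions).filter (fun v => v ≠ "")).map
    (fun v => decide (0 < (PySem.Int.ofStr? v).getD 0))

-- list(compress(xs, sel)): elements of xs whose paired flag is true (zip truncates, as compress does)
def pvCompress (xs : List String) (sel : List Bool) : List String :=
  ((List.zip xs sel).filter (fun pb => pb.2)).map (fun pb => pb.1)

-- ===== PORT A =====
-- A's loop over enumerate(proteins) threading (main_url, main_found, URLs)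
def pvLoopA : List String → String × Bool × List String → String × Bool × List String
  | [], st => st
  | p :: rest, (mu, mf, urls) =>
      if (!PySem.Str.isIn "-" p && !mf) then
        pvLoopA rest ("=HYPERLINK(\"" ++ pvUrlStart ++ p ++ "\")", true, urls)
      else
        pvLoopA rest (mu, mf, urls ++ [pvUrlStart ++ p])

-- proteins = list(compress(proteins.split(';'), found_psites)), shared by both ports
def pvProteins (row : String × String) : List String :=
  pvCompress (pvSplitSemi row.2) (pvFoundPsites row.1)

def add_url_columns (row : String × String) : String × List String :=
  ((pvLoopA (pvProteins row) ("", false, [])).1,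
   (pvLoopA (pvProteins row) ("", false, [])).2.2)

-- ===== PORT B =====
def add_url_columns_alt (row : String × String) : String × List String :=
  -- i = next((j for j, p in enumerate(proteins) if '-' not in p), None)
  match List.findIdx? (fun p => !PySem.Str.isIn "-" p) (pvProteins row) with
  | none => ("", (pvProteins row).map (fun p => pvUrlStart ++ p))
  | some i =>
      -- proteins[:i] + proteins[i+1:] with 0 ≤ i < len is exact as take/drop;
      -- proteins[i] via getD (findIdx? guarantees the index is in range)
      ("=HYPERLINK(\"" ++ pvUrlStart ++ (pvProteins row).getD i "" ++ "\")",
       (((pvProteins row).take i ++ (pvProteins row).drop (i + 1)).map (fun p => pvUrlStart ++ p)))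

-- ===== PRECONDITION & SPEC =====
-- Pre_ excludes exactly the inputs where int(value) raises ValueError (a non-empty piece of
-- start_positions that is not an integer literal), on which A returns nothing.
def Pre_add_url_columns (row : String × String) : Prop :=
  ∀ v ∈ pvSplitSemi row.1, v ≠ "" → (PySem.Int.ofStr? v).isSome
instance (row : String × String) : Decidable (Pre_add_url_columns row) := by
  unfold Pre_add_url_columns; infer_instance

def pvWitness_add_url_columns : (String × String) := ("1;-1;2", "P04637;P04637-2;Q9Y6K9")

def Spec_add_url_columns (row : String × String) (out : String × List String) : Prop := out = add_url_columns_alt row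
instance (row : String × String) (out : String × List String) : Decidable (Spec_add_url_columns row out) := by unfold Spec_add_url_columns; infer_instance

-- ===== CLAIM (what is proved, stated in full; the proofs are below) =====
def Claim_equal_add_url_columns : Prop := ∀ (row : String × String), Dom_add_url_columns row → Pre_add_url_columns row → Spec_add_url_columns row (add_url_columns row)

-- ===== LEMMAS AND PROOFS =====

-- once main_found is true, A's loop only appends URLs
theorem pvLoopA_found (l : List String) (mu : String) (urls : List String) :
    pvLoopA l (mu, true, urls) = (mu, true, urls ++ l.map (fun p => pvUrlStart ++ p)) := by
  induction l generalizing urls with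
  | nil => simp [pvLoopA]
  | cons p rest ih => simp [pvLoopA, ih, List.append_assoc]

-- A's loop from the initial state computes exactly B's locate-first decomposition
theorem pvLoopA_eq (l : List String) (urls : List String) :
    pvLoopA l ("", false, urls) =
      match List.findIdx? (fun p => !PySem.Str.isIn "-" p) l with
      | none => ("", false, urls ++ l.map (fun p => pvUrlStart ++ p))
      | some i => ("=HYPERLINK(\"" ++ pvUrlStart ++ l.getD i "" ++ "\")", true,
          urls ++ (l.take i ++ l.drop (i + 1)).map (fun p => pvUrlStart ++ p)) := by
  induction l generalizing urls with
  | nil => simp [pvLoopA]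
  | cons p rest ih =>
    rw [List.findIdx?_cons]
    cases hp : PySem.Str.isIn "-" p with
    | true =>
      have hstep : pvLoopA (p :: rest) ("", false, urls)
          = pvLoopA rest ("", false, urls ++ [pvUrlStart ++ p]) := by
        simp only [pvLoopA]; rw [hp]; simp
      rw [hstep, ih]
      simp only [Bool.not_true, Bool.false_eq_true, if_false]
      cases h : List.findIdx? (fun p => !PySem.Str.isIn "-" p) rest with
      | none =>
        simp only [Option.map_none, List.map_cons, List.append_assoc, List.singleton_append]
      | some i =>
        simp only [Option.map_some, List.getD_cons_succ, List.take_succ_cons,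
          List.drop_succ_cons, List.append_assoc, List.singleton_append]
        simp
    | false =>
      have hstep : pvLoopA (p :: rest) ("", false, urls)
          = pvLoopA rest ("=HYPERLINK(\"" ++ pvUrlStart ++ p ++ "\")", true, urls) := by
        simp only [pvLoopA]; rw [hp]; simp
      rw [hstep, pvLoopA_found]
      simp only [Bool.not_false, if_true, List.getD_cons_zero, List.take_zero,
        List.drop_succ_cons, List.drop_zero, List.nil_append]

-- ===== VERDICT (by name: the statement is the Claim_ definition above) =====
theorem add_url_columns_spec : Claim_equal_add_url_columns := by
  intro row _ _
  show add_url_columns row = add_url_columns_alt row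
  unfold add_url_columns add_url_columns_alt
  rw [pvLoopA_eq]
  cases List.findIdx? (fun p => !PySem.Str.isIn "-" p) (pvProteins row) with
  | none => rfl
  | some i => rfl
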